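-- pv_equiv track=rewrite | github.com/pinkmann300/dsa_cpp | data_structures/recursion/paren.py | countStepsToZero
-- ===== SOURCE A (Python) =====
-- def countStepsToZero(n, count):
--     if (n == 0):
--         return count
--     else:
--         if (n % 2 == 0):
--             return countStepsToZero(n // 2, count + 1)
--         else:
--             return countStepsToZero(n - 1, count + 1)
-- ===== SOURCE B (Python) =====
-- def countStepsToZero(n, count):
--     # Closed form: for n>0 the process takes bit_length(n) - 1 halvings
--     # plus popcount(n) decrements, i.e. bit_length + popcount - 1 steps.
--     if n == 0:
--         return count
--     return count + n.bit_length() + bin(n).count("1") - 1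
-- ===== Notes on version B (the rewrite author's own statement) =====
-- stated objective: faster
-- what changed: Replaces the step-by-step halve/decrement recursion with the closed form count + bit_length(n) + popcount(n) - 1.
import Mathlib
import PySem

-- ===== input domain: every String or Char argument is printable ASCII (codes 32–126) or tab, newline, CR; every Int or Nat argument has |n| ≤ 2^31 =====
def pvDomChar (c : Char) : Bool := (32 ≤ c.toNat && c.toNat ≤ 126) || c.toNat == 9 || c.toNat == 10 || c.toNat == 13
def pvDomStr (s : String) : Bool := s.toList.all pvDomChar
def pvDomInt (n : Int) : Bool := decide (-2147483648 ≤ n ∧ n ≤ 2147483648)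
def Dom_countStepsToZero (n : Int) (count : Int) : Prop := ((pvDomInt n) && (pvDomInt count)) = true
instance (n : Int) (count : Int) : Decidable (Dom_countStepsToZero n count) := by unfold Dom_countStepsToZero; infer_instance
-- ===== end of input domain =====

-- B replaces the halve/decrement recursion with the closed form
-- count + bit_length(n) + popcount(n) - 1; return values only are compared.

-- ===== PORT A =====
-- Literal port of A's recursion. On n < 0 the Python recurses forever
-- (excluded by Pre_); the `n < 0` guard only makes the Lean function total there.
def countStepsToZero (n : Int) (count : Int) : Int :=
  if n = 0 then count
  else if n < 0 then count  -- unreachable under Pre_: Python diverges for n < 0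
  else if PySem.Int.mod n 2 = 0 then
    countStepsToZero (PySem.Int.floordiv n 2) (count + 1)
  else
    countStepsToZero (n - 1) (count + 1)
termination_by n.toNat
decreasing_by
  · rw [PySem.Int.floordiv_eq_ediv_of_pos (by omega)]; omega
  · omega

-- ===== PORT B =====
def countStepsToZero_alt (n : Int) (count : Int) : Int :=
  if n = 0 then count
  else count + (PySem.Int.bitLength n : Int) + (PySem.Int.bitCount n : Int) - 1

-- ===== PRECONDITION & SPEC =====
-- Pre_ excludes exactly n < 0, where Python A recurses forever (RecursionError).
def Pre_countStepsToZero (n : Int) (count : Int) : Prop := 0 ≤ n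
instance (n : Int) (count : Int) : Decidable (Pre_countStepsToZero n count) := by
  unfold Pre_countStepsToZero; infer_instance
def pvWitness_countStepsToZero : Int × Int := (6, 0)

def Spec_countStepsToZero (n : Int) (count : Int) (out : Int) : Prop := out = countStepsToZero_alt n count
instance (n : Int) (count : Int) (out : Int) : Decidable (Spec_countStepsToZero n count out) := by unfold Spec_countStepsToZero; infer_instance

-- ===== CLAIM (what is proved, stated in full; the proofs are below) =====
def Claim_equal_countStepsToZero : Prop := ∀ (n : Int) (count : Int), Dom_countStepsToZero n count → Pre_countStepsToZero n count → Spec_countStepsToZero n count (countStepsToZero n count)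

-- ===== LEMMAS AND PROOFS =====

-- Main invariant, over Nat so strong induction is available.
theorem countSteps_eq_closed (m : Nat) : ∀ count : Int,
    countStepsToZero (m : Int) count = countStepsToZero_alt (m : Int) count := by
  induction m using Nat.strong_induction_on with
  | _ m ih =>
    intro count
    rcases Nat.eq_zero_or_pos m with h0 | hpos
    · subst h0; simp [countStepsToZero, countStepsToZero_alt]
    have hne : (m : Int) ≠ 0 := by exact_mod_cast Nat.pos_iff_ne_zero.mp hpos
    have hnlt : ¬ ((m : Int) < 0) := by omega
    have hbl := PySem.Int.bitLength_natCast hpos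
    have hbc := PySem.Int.bitCount_natCast hpos
    rcases Nat.even_or_odd m with he | ho
    · -- even case: recurse on m / 2
      have hm2 : m % 2 = 0 := Nat.even_iff.mp he
      have hmc : PySem.Int.mod (m : Int) 2 = ((m % 2 : Nat) : Int) :=
        by exact_mod_cast PySem.Int.mod_natCast m 2
      have hmod : PySem.Int.mod (m : Int) 2 = 0 := by omega
      rw [countStepsToZero]
      simp only [hne, hnlt, hmod, if_false, if_true]
      have hfd : PySem.Int.floordiv (m : Int) 2 = ((m / 2 : Nat) : Int) :=
        by exact_mod_cast PySem.Int.floordiv_natCast m 2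
      rw [hfd, ih (m / 2) (by omega)]
      have hh : m / 2 ≠ 0 := by omega
      have hh' : ((m / 2 : Nat) : Int) ≠ 0 := by exact_mod_cast hh
      simp only [countStepsToZero_alt, if_neg hne, if_neg hh']
      omega
    · -- odd case: recurse on m - 1
      have hm2 : m % 2 = 1 := Nat.odd_iff.mp ho
      have hmc : PySem.Int.mod (m : Int) 2 = ((m % 2 : Nat) : Int) :=
        by exact_mod_cast PySem.Int.mod_natCast m 2
      have hmod : ¬ (PySem.Int.mod (m : Int) 2 = 0) := by omega
      rw [countStepsToZero]
      simp only [hne, hnlt, hmod, if_false]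
      have hcast : (m : Int) - 1 = ((m - 1 : Nat) : Int) := by omega
      rw [hcast, ih (m - 1) (by omega)]
      rcases Nat.eq_or_lt_of_le hpos with h1 | h1
      · -- m = 1
        have : m = 1 := h1.symm
        subst this
        simp only [countStepsToZero_alt]
        norm_num
        rw [show PySem.Int.bitLength 1 = 1 by decide,
            show PySem.Int.bitCount 1 = 1 by decide]
        omega
      · -- m odd, m > 1 : m - 1 is even and positive
        have hp : 0 < m - 1 := by omega
        have hne' : ((m - 1 : Nat) : Int) ≠ 0 := by
          have : m - 1 ≠ 0 := by omega
          exact_mod_cast this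
        have hbl' := PySem.Int.bitLength_natCast hp
        have hbc' := PySem.Int.bitCount_natCast hp
        have hhalf : (m - 1) / 2 = m / 2 := by omega
        simp only [countStepsToZero_alt, if_neg hne, if_neg hne']
        rw [hbl, hbc, hbl', hbc', hhalf]
        omega

-- ===== VERDICT (by name: the statement is the Claim_ definition above) =====
theorem countStepsToZero_spec : Claim_equal_countStepsToZero := by
  intro n count _ hpre
  unfold Spec_countStepsToZero
  have h : n = ((n.toNat : Nat) : Int) := by
    unfold Pre_countStepsToZero at hpre; omega
  rw [h]
  exact countSteps_eq_closed n.toNat count
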